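-- pv_equiv track=rewrite | github.com/Dan-Denehy/MyCellium | src/core/formula_parser.py | cell_to_row_col
-- ===== SOURCE A (Python) =====
-- def cell_to_row_col(cell):
--     """
--     Converts a cell reference (e.g., 'A1', 'F2') to a zero-indexed (row, col) tuple.
--
--     Args:
--         cell (str): The cell reference in the format 'ColumnRow' (e.g., 'A1', 'F2', 'AA100').
--
--     Returns:
--         tuple: A tuple (row, col), where row and col are zero-indexed.
--     """
--     # Split the cell reference into letters (column) and digits (row)
--     column = ''.join(filter(str.isalpha, cell))  # Get the letters (e.g., 'A', 'F', 'AA')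
--     row = ''.join(filter(str.isdigit, cell))  # Get the digits (e.g., '1', '100')
--
--     # Convert the column from letters to a zero-indexed column number
--     col_index = 0
--     for char in column:
--         col_index = col_index * 26 + (ord(char.upper()) - ord('A') + 1)  # Convert each letter to a base-26 number
--     col_index -= 1  # Convert to zero-based index
--
--     # Convert the row number to zero-based index
--     row_index = int(row) - 1
--
--     return row_index, col_index
-- ===== SOURCE B (Python) =====
-- def cell_to_row_col(cell):
--     # Alternative decomposition: right-to-left positional-weight accumulation for the
--     # column instead of A's left-to-right Horner fold.
--     letters = [c for c in cell if c.isalpha()]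
--     digits = ''.join(c for c in cell if c.isdigit())
--     col = -1
--     power = 1
--     for c in reversed(letters):
--         col += (ord(c.upper()) - ord('A') + 1) * power
--         power *= 26
--     return int(digits) - 1, col
-- ===== Notes on version B (the rewrite author's own statement) =====
-- stated objective: alternative
-- what changed: The column value is computed by a right-to-left pass over the letters accumulating an explicit positional weight (power of 26) instead of A's left-to-right Horner fold with a running base-26 accumulator.
import Mathlib
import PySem

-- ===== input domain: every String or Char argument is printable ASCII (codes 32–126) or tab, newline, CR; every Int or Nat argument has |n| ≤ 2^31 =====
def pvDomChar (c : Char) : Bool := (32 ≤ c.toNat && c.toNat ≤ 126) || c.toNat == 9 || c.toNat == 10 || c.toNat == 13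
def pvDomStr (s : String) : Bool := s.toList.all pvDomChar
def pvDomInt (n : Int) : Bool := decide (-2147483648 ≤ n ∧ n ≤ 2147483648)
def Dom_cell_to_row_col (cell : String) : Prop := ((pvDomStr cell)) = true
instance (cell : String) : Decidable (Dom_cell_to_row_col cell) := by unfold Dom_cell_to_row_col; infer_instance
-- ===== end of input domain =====

-- B computes the column by a right-to-left positional-weight pass instead of A's Horner fold; same values.

-- ===== PORT A =====
-- ord(char.upper()) - ord('A') + 1
def pvLetterVal (c : Char) : Int := ((PySem.Chars.upperChar c).toNat : Int) - 65 + 1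

def cell_to_row_col (cell : String) : Int × Int :=
  let column := cell.toList.filter PySem.Chars.isalpha
  let row := cell.toList.filter PySem.Chars.isdigit
  let colIndex := column.foldl (fun acc c => acc * 26 + pvLetterVal c) 0 - 1
  -- int(row): ofChars? is none exactly where Python raises ValueError; Pre_ excludes that
  let rowIndex := (PySem.Int.ofChars? row).getD 0 - 1
  (rowIndex, colIndex)

-- ===== PORT B =====
def cell_to_row_col_alt (cell : String) : Int × Int :=
  let letters := cell.toList.filter PySem.Chars.isalpha
  let digits := cell.toList.filter PySem.Chars.isdigit
  -- for c in reversed(letters): col += val(c) * power; power *= 26   (state = (col, power))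
  let st := letters.reverse.foldl
      (fun (sp : Int × Int) c => (sp.1 + pvLetterVal c * sp.2, sp.2 * 26)) (-1, 1)
  ((PySem.Int.ofChars? digits).getD 0 - 1, st.1)

-- ===== PRECONDITION & SPEC =====
-- Pre_ excludes cells with no digit character: on those Python A raises ValueError (and so does B).
def Pre_cell_to_row_col (cell : String) : Prop :=
  cell.toList.any PySem.Chars.isdigit = true
instance (cell : String) : Decidable (Pre_cell_to_row_col cell) := by
  unfold Pre_cell_to_row_col; infer_instance

def pvWitness_cell_to_row_col : String := "A1"

def Spec_cell_to_row_col (cell : String) (out : Int × Int) : Prop := out = cell_to_row_col_alt cell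
instance (cell : String) (out : Int × Int) : Decidable (Spec_cell_to_row_col cell out) := by
  unfold Spec_cell_to_row_col; infer_instance

-- ===== CLAIM (what is proved, stated in full; the proofs are below) =====
def Claim_equal_cell_to_row_col : Prop := ∀ (cell : String), Dom_cell_to_row_col cell → Pre_cell_to_row_col cell → Spec_cell_to_row_col cell (cell_to_row_col cell)

-- ===== LEMMAS AND PROOFS =====

-- Shifting the Horner accumulator multiplies in 26^length.
theorem pv_horner_shift (l : List Char) (a b : Int) :
    l.foldl (fun acc c => acc * 26 + pvLetterVal c) (a + b) =
      a * 26 ^ l.length + l.foldl (fun acc c => acc * 26 + pvLetterVal c) b := by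
  induction l generalizing a b with
  | nil => simp
  | cons c l ih =>
    simp only [List.foldl_cons, List.length_cons]
    have h : (a + b) * 26 + pvLetterVal c = a * 26 + (b * 26 + pvLetterVal c) := by ring
    rw [h, ih]
    ring

-- The right-to-left (col, power) pass equals Horner plus the initial state.
theorem pv_foldr_pair (l : List Char) (s p : Int) :
    l.foldr (fun c (sp : Int × Int) => (sp.1 + pvLetterVal c * sp.2, sp.2 * 26)) (s, p) =
      (s + l.foldl (fun acc c => acc * 26 + pvLetterVal c) 0 * p, p * 26 ^ l.length) := by
  induction l generalizing s p with
  | nil => simp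
  | cons c l ih =>
    simp only [List.foldr_cons, List.foldl_cons, List.length_cons, ih]
    rw [show (0 : Int) * 26 + pvLetterVal c = pvLetterVal c + 0 by ring, pv_horner_shift]
    apply Prod.ext <;> simp <;> ring

-- ===== VERDICT (by name: the statement is the Claim_ definition above) =====
theorem cell_to_row_col_spec : Claim_equal_cell_to_row_col := by
  intro cell _ _
  unfold Spec_cell_to_row_col cell_to_row_col cell_to_row_col_alt
  simp only [List.foldl_reverse]
  rw [pv_foldr_pair]
  refine Prod.ext rfl ?_
  simp
  ring
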